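-- pv_equiv track=rewrite | github.com/irisapei/Mahjong | hu.py | isChi
-- ===== SOURCE A (Python) =====
-- def containsConsecutive(list):
--     list.sort()
--     counter = 0
--     if len(list)>2:
--         for i in range (len(list)-1):
--             if counter ==1 :
--                 return True
--             if list[i]+1 == list[i+1]:
--                 counter +=1
--             if list[i]+1 != list[i+1]:
--                 counter = 0
--     return False
--
-- def isChi(lst, givenTile):
--     wanTiles, tiaoTiles, bingTiles = [], [], []
--     nameValuesWan = {"yiwan":1, "erwan":2, "sanwan":3, "siwan":4, "wuwan":5, "liuwan":6, "qiwan":7, "bawan": 8, "jiuwan":9}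
--
--     nameValuesTiao = {"yitiao":1, "ertiao":2, "santiao":3, "sitiao":4, "wutiao":5, "liutiao":6, "qitiao":7, "batiao": 8, "jiutiao":9}
--
--     nameValuesBing = {"yibing":1, "liangbing":2, "sanbing":3, "sibing":4, "wubing":5, "liubing":6, "qibing":7, "babing": 8, "jiubing":9}
--     #adds each type of tile to their own individual list
--     for tile in lst:
--         if "wan" in tile: wanTiles.append(tile)
--         elif "tiao" in tile: tiaoTiles.append(tile)
--         elif "bing" in tile: bingTiles.append(tile)
--     wanNumbers, tiaoNumbers, bingNumbers = [], [], []
--     if "wan" in givenTile: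
--         for wan in wanTiles:
--             wanNumbers.append(nameValuesWan[wan])
--
--         if containsConsecutive(wanNumbers) == False:
--             wanNumbers.append(nameValuesWan[givenTile])
--             if containsConsecutive(wanNumbers):
--                 return True
--     elif "tiao" in givenTile:
--         for tiao in tiaoTiles:
--             tiaoNumbers.append(nameValuesTiao[tiao])
--         if containsConsecutive(tiaoNumbers) == False:
--             tiaoNumbers.append(nameValuesTiao[givenTile])
--             if containsConsecutive(tiaoNumbers):
--                 return True
--     elif "bing" in givenTile:
--         for bing in bingTiles:
--             bingNumbers.append(nameValuesBing[bing])
--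
--         if containsConsecutive(bingNumbers) == False:
--             bingNumbers.append(nameValuesBing[givenTile])
--             if containsConsecutive(bingNumbers):
--                 return True
--     return False
-- ===== SOURCE B (Python) =====
-- SUIT_VALUES = {
--     "wan":  {"yiwan": 1, "erwan": 2, "sanwan": 3, "siwan": 4, "wuwan": 5,
--              "liuwan": 6, "qiwan": 7, "bawan": 8, "jiuwan": 9},
--     "tiao": {"yitiao": 1, "ertiao": 2, "santiao": 3, "sitiao": 4, "wutiao": 5,
--              "liutiao": 6, "qitiao": 7, "batiao": 8, "jiutiao": 9},
--     "bing": {"yibing": 1, "liangbing": 2, "sanbing": 3, "sibing": 4, "wubing": 5,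
--              "liubing": 6, "qibing": 7, "babing": 8, "jiubing": 9},
-- }
--
-- def _suit(tile):
--     return next((s for s in SUIT_VALUES if s in tile), None)
--
-- def _has_consecutive(nums):
--     values = set(nums)
--     return len(nums) > 2 and any(v + 1 in values for v in values)
--
-- def isChi(lst, givenTile):
--     suit = _suit(givenTile)
--     if suit is None:
--         return False
--     table = SUIT_VALUES[suit]
--     nums = [table[t] for t in lst if _suit(t) == suit]
--     if _has_consecutive(nums):
--         return False
--     nums.append(table[givenTile])
--     return _has_consecutive(nums)
-- ===== Notes on version B (the rewrite author's own statement) =====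
-- stated objective: alternative
-- what changed: B resolves givenTile's suit once and tests for a consecutive pair by set membership (any v with v+1 in the set of same-suit values), with no sorting at all, instead of A's triple classification pass plus per-suit sort-and-counter scan; Pre_ excludes inputs where A raises KeyError (an ill-named same-suit tile or, when the same-suit hand has no run, an ill-named givenTile).
-- intended difference: On hands whose relevant consecutive pair of same-suit values sits at the very top of the sorted order (v and v+1 with v+1 the unique maximum), A's counter loop checks one step late and never counts that final pair, so A misreads the run: e.g. on (['yiwan','siwan'],'wuwan') A returns False and B returns True; B's membership test counts every consecutive pair, the evident intent of A's loop. — e.g. on isChi(["yiwan", "siwan"], "wuwan"): A returns false, B returns true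
-- outside the precondition, e.g. on isChi(['yiwan', 'erwan', 'sanwan', 'siwan'], 'wan'): A returns False, B returns False
import Mathlib
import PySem

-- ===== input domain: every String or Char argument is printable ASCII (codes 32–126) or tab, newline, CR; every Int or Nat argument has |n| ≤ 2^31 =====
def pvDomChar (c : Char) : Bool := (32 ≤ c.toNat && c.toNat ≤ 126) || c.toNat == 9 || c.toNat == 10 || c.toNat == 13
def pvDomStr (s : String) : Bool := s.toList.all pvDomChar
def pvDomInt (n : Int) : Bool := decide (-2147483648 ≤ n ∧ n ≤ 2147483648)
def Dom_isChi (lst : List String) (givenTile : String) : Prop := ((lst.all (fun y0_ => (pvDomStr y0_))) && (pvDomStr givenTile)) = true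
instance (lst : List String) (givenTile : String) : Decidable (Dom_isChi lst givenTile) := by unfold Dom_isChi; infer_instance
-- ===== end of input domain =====

-- B resolves givenTile's suit once and tests for a consecutive pair by set membership
-- (some v with v+1 in the set of same-suit values), with no sorting, instead of A's
-- triple classification pass plus sort-and-counter scan (objective: alternative).
-- On the D_ inputs below A's counter loop misses the final sorted pair and B differs.
-- Equivalence is about return values; A's helper sorts only its own temporary lists.

-- ===== PORT A =====
-- name → value tables of A (KeyError on a missing name is excluded by Pre_; the port uses getD 0 there)
def nameValuesWan : PySem.Dict String Int := PySem.Dict.ofList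
  [("yiwan",1), ("erwan",2), ("sanwan",3), ("siwan",4), ("wuwan",5), ("liuwan",6), ("qiwan",7), ("bawan",8), ("jiuwan",9)]
def nameValuesTiao : PySem.Dict String Int := PySem.Dict.ofList
  [("yitiao",1), ("ertiao",2), ("santiao",3), ("sitiao",4), ("wutiao",5), ("liutiao",6), ("qitiao",7), ("batiao",8), ("jiutiao",9)]
def nameValuesBing : PySem.Dict String Int := PySem.Dict.ofList
  [("yibing",1), ("liangbing",2), ("sanbing",3), ("sibing",4), ("wubing",5), ("liubing",6), ("qibing",7), ("babing",8), ("jiubing",9)]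

-- the 'for i in range(len(list)-1)' loop of containsConsecutive, with its early return and counter
def ccGo (s : List Int) : List Nat → Int → Bool
  | [], _ => false
  | i :: rest, counter =>
    if counter = 1 then true
    else
      let c1 := if s.getD i 0 + 1 = s.getD (i + 1) 0 then counter + 1 else counter
      let c2 := if s.getD i 0 + 1 ≠ s.getD (i + 1) 0 then (0 : Int) else c1
      ccGo s rest c2

def containsConsecutive (l : List Int) : Bool :=
  let s := PySem.List.sorted l (fun x => x) false   -- list.sort()
  if s.length > 2 then ccGo s (List.range (s.length - 1)) 0 else false

-- Python mutates wanNumbers in place (containsConsecutive sorts it); the port keeps the unsorted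
-- list and appends to it — value-exact, since containsConsecutive re-sorts its argument anyway.
def isChi (lst : List String) (givenTile : String) : Bool :=
  let t3 := lst.foldl (fun (acc : List String × List String × List String) tile =>
      if PySem.Str.isIn "wan" tile then (acc.1 ++ [tile], acc.2.1, acc.2.2)
      else if PySem.Str.isIn "tiao" tile then (acc.1, acc.2.1 ++ [tile], acc.2.2)
      else if PySem.Str.isIn "bing" tile then (acc.1, acc.2.1, acc.2.2 ++ [tile])
      else acc) ([], [], [])
  if PySem.Str.isIn "wan" givenTile then
    let wanNumbers := t3.1.foldl (fun acc w => acc ++ [nameValuesWan.getD w 0]) []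
    if containsConsecutive wanNumbers = false then
      containsConsecutive (wanNumbers ++ [nameValuesWan.getD givenTile 0])
    else false
  else if PySem.Str.isIn "tiao" givenTile then
    let tiaoNumbers := t3.2.1.foldl (fun acc w => acc ++ [nameValuesTiao.getD w 0]) []
    if containsConsecutive tiaoNumbers = false then
      containsConsecutive (tiaoNumbers ++ [nameValuesTiao.getD givenTile 0])
    else false
  else if PySem.Str.isIn "bing" givenTile then
    let bingNumbers := t3.2.2.foldl (fun acc w => acc ++ [nameValuesBing.getD w 0]) []
    if containsConsecutive bingNumbers = false then
      containsConsecutive (bingNumbers ++ [nameValuesBing.getD givenTile 0])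
    else false
  else false

-- ===== PORT B =====
-- next((s for s in SUIT_VALUES if s in tile), None)
def suitOf (t : String) : Option String :=
  ["wan", "tiao", "bing"].find? (fun s => PySem.Str.isIn s t)

-- SUIT_VALUES[suit]
def suitVals (s : String) : PySem.Dict String Int :=
  if s == "wan" then PySem.Dict.ofList
    [("yiwan",1), ("erwan",2), ("sanwan",3), ("siwan",4), ("wuwan",5), ("liuwan",6), ("qiwan",7), ("bawan",8), ("jiuwan",9)]
  else if s == "tiao" then PySem.Dict.ofList
    [("yitiao",1), ("ertiao",2), ("santiao",3), ("sitiao",4), ("wutiao",5), ("liutiao",6), ("qitiao",7), ("batiao",8), ("jiutiao",9)]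
  else PySem.Dict.ofList
    [("yibing",1), ("liangbing",2), ("sanbing",3), ("sibing",4), ("wubing",5), ("liubing",6), ("qibing",7), ("babing",8), ("jiubing",9)]

-- len(nums) > 2 and any(v + 1 in values for v in values); 'any' over a set is order-independent
def hasConsecutive (nums : List Int) : Bool :=
  let values := PySem.Set.ofList nums
  decide (2 < nums.length) && values.any (fun v => PySem.Set.contains values (v + 1))

def isChi_alt (lst : List String) (givenTile : String) : Bool :=
  match suitOf givenTile with
  | none => false
  | some suit =>
    let table := suitVals suit
    let nums := (lst.filter (fun t => suitOf t == some suit)).map (fun t => table.getD t 0)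
    if hasConsecutive nums then false
    else hasConsecutive (nums ++ [table.getD givenTile 0])

-- ===== PRECONDITION & SPEC =====
-- suit detection / tile values restated independently of the ports, for Pre_ and D_ only
def dSuit (t : String) : Option String :=
  if PySem.Str.isIn "wan" t then some "wan"
  else if PySem.Str.isIn "tiao" t then some "tiao"
  else if PySem.Str.isIn "bing" t then some "bing"
  else none

-- the name → value table of a tile's suit (A's own tables, selected by the tile's name)
def dTab (g : String) : PySem.Dict String Int :=
  if PySem.Str.isIn "wan" g then nameValuesWan
  else if PySem.Str.isIn "tiao" g then nameValuesTiao else nameValuesBing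

-- Pre_ excludes the inputs where A raises KeyError (a hand tile of givenTile's suit, or givenTile
-- itself, is not a legal name of that suit); it additionally requires givenTile to be a legal name
-- even when the same-suit hand already contains a run — there A happens to return False without
-- looking givenTile up, and stating that lazy-lookup domain exactly would re-simulate the run check.
def Pre_isChi (lst : List String) (givenTile : String) : Prop :=
  (match dSuit givenTile with
   | none => true
   | some s => (dTab givenTile).contains givenTile &&
       lst.all (fun t => dSuit t != some s || (dTab givenTile).contains t)) = true

instance (lst : List String) (givenTile : String) : Decidable (Pre_isChi lst givenTile) := by
  unfold Pre_isChi; infer_instance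

def pvWitness_isChi : List String × String := (["yiwan", "erwan", "wutiao"], "sanwan")

-- the sorted same-suit values make a +1 step at some index below length - k
def dRunB (l : List Int) (k : Nat) : Bool :=
  let S := PySem.List.sorted l (fun x => x) false
  decide (2 < l.length) &&
    (List.range (l.length - k)).any (fun i => decide (S.getD i 0 + 1 = S.getD (i + 1) 0))

-- On hands whose relevant consecutive pair of same-suit values sits at the very top of the sorted
-- order (v and v+1 with v+1 the unique maximum), A's counter loop checks one step late and never
-- counts that final pair, so A misreads the run (False where the pair first appears with the added
-- tile, True where the hand already held such a top pair and the added tile completes an inner one);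
-- B's membership test counts every consecutive pair, the evident intent of A's loop.
def D_isChi (lst : List String) (givenTile : String) : Prop :=
  let n := (lst.filter (fun t => dSuit t == dSuit givenTile)).map ((dTab givenTile).getD · 0)
  let m := n ++ [(dTab givenTile).getD givenTile 0]
  dSuit givenTile ≠ none ∧ (!dRunB n 2 && dRunB m 1 && (dRunB n 1 == dRunB m 2)) = true

instance (lst : List String) (givenTile : String) : Decidable (D_isChi lst givenTile) := by
  unfold D_isChi; infer_instance

def Spec_isChi (lst : List String) (givenTile : String) (out : Bool) : Prop :=
  ¬ D_isChi lst givenTile → out = isChi_alt lst givenTile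
instance (lst : List String) (givenTile : String) (out : Bool) : Decidable (Spec_isChi lst givenTile out) := by unfold Spec_isChi; infer_instance

def pvDiffWitness_isChi : List String × String := (["yiwan", "siwan"], "wuwan")
def pvDiffWitnessOut_isChi : Bool × Bool := (false, true)

-- ===== CLAIM (what is proved, stated in full; the proofs are below) =====
def Claim_unchanged_isChi : Prop := ∀ (lst : List String) (givenTile : String), Dom_isChi lst givenTile → Pre_isChi lst givenTile → Spec_isChi lst givenTile (isChi lst givenTile)
def Claim_changed_isChi : Prop := Dom_isChi (pvDiffWitness_isChi.1) (pvDiffWitness_isChi.2) ∧ Pre_isChi (pvDiffWitness_isChi.1) (pvDiffWitness_isChi.2) ∧ D_isChi (pvDiffWitness_isChi.1) (pvDiffWitness_isChi.2) ∧ isChi (pvDiffWitness_isChi.1) (pvDiffWitness_isChi.2) = pvDiffWitnessOut_isChi.1 ∧ isChi_alt (pvDiffWitness_isChi.1) (pvDiffWitness_isChi.2) = pvDiffWitnessOut_isChi.2 ∧ pvDiffWitnessOut_isChi.1 ≠ pvDiffWitnessOut_isChi.2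
def Claim_exact_isChi : Prop := ∀ (lst : List String) (givenTile : String), Dom_isChi lst givenTile → Pre_isChi lst givenTile → D_isChi lst givenTile → isChi lst givenTile ≠ isChi_alt lst givenTile

-- ===== LEMMAS AND PROOFS =====

theorem ccGo_cons_zero (s : List Int) (j : Nat) (rest : List Nat) :
    ccGo s (j :: rest) 0 =
      if s.getD j 0 + 1 = s.getD (j + 1) 0 then ccGo s rest 1 else ccGo s rest 0 := by
  by_cases h : s.getD j 0 + 1 = s.getD (j + 1) 0 <;>
    [skip; skip] <;> first
  | (rw [if_pos h]; simp only [List.getD_eq_getElem?_getD] at h; simp [ccGo, h])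
  | (rw [if_neg h]; simp only [List.getD_eq_getElem?_getD] at h; simp [ccGo, h])

theorem ccGo_cons_one (s : List Int) (j : Nat) (rest : List Nat) : ccGo s (j :: rest) 1 = true := by
  simp [ccGo]

-- A's counter loop over L ++ [last] returns true iff some index of L is adjacent: the pair seen at
-- the last index never gets its counter checked.
theorem ccGo_append_last (s : List Int) (L : List Nat) (i : Nat) :
    ccGo s (L ++ [i]) 0 = L.any (fun j => decide (s.getD j 0 + 1 = s.getD (j + 1) 0)) := by
  induction L with
  | nil =>
    rw [List.nil_append, ccGo_cons_zero]
    split <;> rfl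
  | cons j L ih =>
    rw [List.cons_append, ccGo_cons_zero]
    by_cases h : s.getD j 0 + 1 = s.getD (j + 1) 0
    · rw [if_pos h]
      have h1 : ccGo s (L ++ [i]) 1 = true := by
        cases L with
        | nil => exact ccGo_cons_one s i []
        | cons k r => exact ccGo_cons_one s k (r ++ [i])
      simp only [List.getD_eq_getElem?_getD] at h
      simp [h1, h]
    · rw [if_neg h, ih]
      simp only [List.getD_eq_getElem?_getD] at h
      simp [h]

-- A's containsConsecutive is exactly the 'step strictly before the last sorted pair' test
theorem cc_eq_innerB (l : List Int) : containsConsecutive l = dRunB l 2 := by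
  show (if (PySem.List.sorted l (fun x => x) false).length > 2
      then ccGo (PySem.List.sorted l (fun x => x) false)
        (List.range ((PySem.List.sorted l (fun x => x) false).length - 1)) 0 else false)
    = dRunB l 2
  rw [PySem.List.length_sorted]
  unfold dRunB
  by_cases h : 2 < l.length
  · rw [if_pos h, show l.length - 1 = (l.length - 2) + 1 by omega, List.range_succ,
      ccGo_append_last]
    simp [h]
  · rw [if_neg h]
    simp [h]

-- a +1 step among the sorted values below the top ⟹ v and v+1 both occur
theorem pair_of_mem (S : List Int) (hS : S.Pairwise (· ≤ ·)) (v : Int)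
    (hv : v ∈ S) (hv1 : v + 1 ∈ S) :
    ∃ i, i + 1 < S.length ∧ S.getD i 0 + 1 = S.getD (i + 1) 0 := by
  have mono : ∀ i j : Nat, i < j → j < S.length → S.getD i 0 ≤ S.getD j 0 := by
    intro i j hij hj
    rw [List.getD_eq_getElem S 0 (Nat.lt_trans hij hj), List.getD_eq_getElem S 0 hj]
    exact List.pairwise_iff_getElem.mp hS i j (Nat.lt_trans hij hj) hj hij
  set p : Int → Bool := fun x => decide (v < x) with hp
  set i := S.findIdx p with hidef
  have hi : i < S.length :=
    List.findIdx_lt_length.mpr ⟨v + 1, hv1, by simp only [hp, decide_eq_true_eq]; omega⟩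
  have hpi : v < S.getD i 0 := by
    rw [List.getD_eq_getElem S 0 hi]
    have := @List.findIdx_getElem _ p S hi
    simpa [hp] using this
  obtain ⟨j, hj, hSj⟩ := List.getElem_of_mem hv1
  have hj' : S.getD j 0 = v + 1 := by rw [List.getD_eq_getElem S 0 hj]; exact hSj
  have hij : i ≤ j := by
    rcases Nat.lt_or_ge j i with hcon | hge
    · exfalso
      have hf := List.not_of_lt_findIdx (p := p) (xs := S) hcon
      have hf' : ¬ v < S.getD j 0 := by
        rw [List.getD_eq_getElem S 0 hj]
        simpa [hp] using hf
      omega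
    · exact hge
  have hSile : S.getD i 0 ≤ v + 1 := by
    rcases Nat.lt_or_ge i j with hlt | hge
    · have := mono i j hlt hj; omega
    · have heq : i = j := by omega
      rw [heq, hj']
  obtain ⟨k, hk, hSk⟩ := List.getElem_of_mem hv
  have hk' : S.getD k 0 = v := by rw [List.getD_eq_getElem S 0 hk]; exact hSk
  have hki : k < i := by
    rcases Nat.lt_or_ge k i with hlt | hge
    · exact hlt
    · exfalso
      rcases Nat.lt_or_ge i k with hlt2 | hge2
      · have := mono i k hlt2 hk; omega
      · have heq : i = k := by omega
        rw [← heq] at hk'; omega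
  have h1le : S.getD (i - 1) 0 ≤ v := by
    have hf := List.not_of_lt_findIdx (p := p) (xs := S) (show i - 1 < i by omega)
    have hf' : ¬ v < S.getD (i - 1) 0 := by
      rw [List.getD_eq_getElem S 0 (by omega)]
      simpa [hp] using hf
    omega
  have h1ge : v ≤ S.getD (i - 1) 0 := by
    rcases Nat.lt_or_ge k (i - 1) with hlt | hge
    · have := mono k (i - 1) hlt (by omega); omega
    · have heq : k = i - 1 := by omega
      rw [← heq]; omega
  refine ⟨i - 1, by omega, ?_⟩
  rw [show i - 1 + 1 = i by omega]
  omega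

-- the set-membership test equals the sorted adjacent-pair test
theorem near_iff (nums : List Int) :
    (∃ i, i < nums.length - 1 ∧
        (PySem.List.sorted nums (fun x => x) false).getD i 0 + 1
          = (PySem.List.sorted nums (fun x => x) false).getD (i + 1) 0)
    ↔ (∃ v ∈ nums, v + 1 ∈ nums) := by
  set S := PySem.List.sorted nums (fun x => x) false with hSdef
  have hperm : S.Perm nums := PySem.List.sorted_perm nums (fun x => x) false
  have hlen : S.length = nums.length := PySem.List.length_sorted nums (fun x => x) false
  constructor
  · rintro ⟨i, hi, hstep⟩
    have hi1 : i + 1 < S.length := by omega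
    have hiS : i < S.length := by omega
    have e1 : S.getD i 0 = S[i] := List.getD_eq_getElem S 0 hiS
    have e2 : S.getD (i+1) 0 = S[i+1] := List.getD_eq_getElem S 0 hi1
    refine ⟨S[i], hperm.mem_iff.mp (List.getElem_mem hiS), ?_⟩
    have : S[i] + 1 = S[i+1] := by omega
    rw [this]
    exact hperm.mem_iff.mp (List.getElem_mem hi1)
  · rintro ⟨v, hv, hv1⟩
    have hS : S.Pairwise (· ≤ ·) := PySem.List.sorted_pairwise nums (fun x => x)
    obtain ⟨i, hi, hstep⟩ :=
      pair_of_mem S hS v (hperm.mem_iff.mpr hv) (hperm.mem_iff.mpr hv1)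
    exact ⟨i, by omega, hstep⟩

-- B's hasConsecutive is exactly the 'some step among the sorted pairs' test
theorem hc_eq_nearB (nums : List Int) : hasConsecutive nums = dRunB nums 1 := by
  unfold hasConsecutive dRunB
  by_cases h : 2 < nums.length
  · simp only [h, decide_true, Bool.true_and]
    have lhs_iff : (PySem.Set.ofList nums).any
        (fun v => PySem.Set.contains (PySem.Set.ofList nums) (v + 1)) = true
        ↔ (∃ v ∈ nums, v + 1 ∈ nums) := by
      rw [List.any_eq_true]
      constructor
      · rintro ⟨v, hv, hc⟩
        exact ⟨v, (PySem.Set.mem_ofList nums v).mp hv,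
          (PySem.Set.mem_ofList nums (v+1)).mp ((PySem.Set.contains_iff _ _).mp hc)⟩
      · rintro ⟨v, hv, hv1⟩
        exact ⟨v, (PySem.Set.mem_ofList nums v).mpr hv,
          (PySem.Set.contains_iff _ _).mpr ((PySem.Set.mem_ofList nums (v+1)).mpr hv1)⟩
    have rhs_iff : (List.range (nums.length - 1)).any
        (fun i => decide ((PySem.List.sorted nums (fun x => x) false).getD i 0 + 1
          = (PySem.List.sorted nums (fun x => x) false).getD (i + 1) 0)) = true
        ↔ (∃ v ∈ nums, v + 1 ∈ nums) := by
      rw [List.any_eq_true]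
      rw [← near_iff nums]
      constructor
      · rintro ⟨i, hi, hd⟩
        exact ⟨i, List.mem_range.mp hi, of_decide_eq_true hd⟩
      · rintro ⟨i, hi, hd⟩
        exact ⟨i, List.mem_range.mpr hi, decide_eq_true hd⟩
    rw [Bool.eq_iff_iff, lhs_iff, rhs_iff]
  · simp [h]

theorem run2_to_run1 (l : List Int) (h : dRunB l 2 = true) : dRunB l 1 = true := by
  unfold dRunB at h ⊢
  rw [Bool.and_eq_true_iff] at h ⊢
  obtain ⟨h1, h2⟩ := h
  obtain ⟨i, hi, hd⟩ := List.any_eq_true.mp h2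
  exact ⟨h1, List.any_eq_true.mpr ⟨i, List.mem_range.mpr (by have := List.mem_range.mp hi; omega), hd⟩⟩

-- the guarded double test differs between the two step predicates exactly on the D_ pattern
theorem guard_core (a1 a2 b1 b2 : Bool) (h1 : a1 = true → b1 = true) (h2 : a2 = true → b2 = true) :
    ((if a1 = false then a2 else false) ≠ (if b1 = true then false else b2))
      ↔ (!a1 && b2 && (b1 == a2)) = true := by
  cases a1 <;> cases a2 <;> cases b1 <;> cases b2 <;> simp_all

theorem suitOf_eq_wan (t : String) : (suitOf t == some "wan") = PySem.Str.isIn "wan" t := by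
  cases hw : PySem.Str.isIn "wan" t <;> cases ht : PySem.Str.isIn "tiao" t <;>
    cases hb : PySem.Str.isIn "bing" t <;>
    simp only [suitOf, List.find?, hw, ht, hb] <;> rfl

theorem suitOf_eq_tiao (t : String) :
    (suitOf t == some "tiao") = (!PySem.Str.isIn "wan" t && PySem.Str.isIn "tiao" t) := by
  cases hw : PySem.Str.isIn "wan" t <;> cases ht : PySem.Str.isIn "tiao" t <;>
    cases hb : PySem.Str.isIn "bing" t <;>
    simp only [suitOf, List.find?, hw, ht, hb] <;> rfl

theorem suitOf_eq_bing (t : String) :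
    (suitOf t == some "bing")
      = (!PySem.Str.isIn "wan" t && (!PySem.Str.isIn "tiao" t && PySem.Str.isIn "bing" t)) := by
  cases hw : PySem.Str.isIn "wan" t <;> cases ht : PySem.Str.isIn "tiao" t <;>
    cases hb : PySem.Str.isIn "bing" t <;>
    simp only [suitOf, List.find?, hw, ht, hb] <;> rfl

theorem dSuit_eq_suitOf (t : String) : dSuit t = suitOf t := by
  cases hw : PySem.Str.isIn "wan" t <;> cases ht : PySem.Str.isIn "tiao" t <;>
    cases hb : PySem.Str.isIn "bing" t <;>
    simp only [dSuit, suitOf, List.find?, hw, ht, hb] <;> rfl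

-- the classification loop of A builds the three filtered sublists
theorem classify_eq (lst : List String) (a b c : List String) :
    lst.foldl (fun (acc : List String × List String × List String) tile =>
      if PySem.Str.isIn "wan" tile then (acc.1 ++ [tile], acc.2.1, acc.2.2)
      else if PySem.Str.isIn "tiao" tile then (acc.1, acc.2.1 ++ [tile], acc.2.2)
      else if PySem.Str.isIn "bing" tile then (acc.1, acc.2.1, acc.2.2 ++ [tile])
      else acc) (a, b, c)
    = (a ++ lst.filter (fun t => PySem.Str.isIn "wan" t),
       b ++ lst.filter (fun t => !PySem.Str.isIn "wan" t && PySem.Str.isIn "tiao" t),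
       c ++ lst.filter (fun t => !PySem.Str.isIn "wan" t && (!PySem.Str.isIn "tiao" t && PySem.Str.isIn "bing" t))) := by
  induction lst generalizing a b c with
  | nil => simp
  | cons t ts ih =>
    simp only [List.foldl_cons, List.filter_cons]
    cases hw : PySem.Str.isIn "wan" t <;> cases ht : PySem.Str.isIn "tiao" t <;>
      cases hb : PySem.Str.isIn "bing" t <;>
      (simp at hw ht hb ih; simp [ih, List.append_assoc])

theorem suitVals_wan : suitVals "wan" = nameValuesWan := by simp [suitVals, nameValuesWan]
theorem suitVals_tiao : suitVals "tiao" = nameValuesTiao := by simp [suitVals, nameValuesTiao]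
theorem suitVals_bing : suitVals "bing" = nameValuesBing := by simp [suitVals, nameValuesBing]

-- A ≠ B exactly on D_
theorem main_iff (lst : List String) (givenTile : String) :
    (isChi lst givenTile ≠ isChi_alt lst givenTile) ↔ D_isChi lst givenTile := by
  unfold isChi isChi_alt D_isChi
  rw [classify_eq]
  simp only [PySem.List.foldl_append_singleton_eq_map, List.nil_append]
  by_cases hw : PySem.Str.isIn "wan" givenTile = true
  · rw [if_pos hw]
    have hs : suitOf givenTile = some "wan" := by
      simp only [suitOf, List.find?, hw]
    have hd : dSuit givenTile = some "wan" := by rw [dSuit_eq_suitOf]; exact hs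
    have htab : dTab givenTile = nameValuesWan := by
      have hw' : PySem.Chars.isIn ['w','a','n'] givenTile.toList = true := by simpa using hw
      simp [dTab, hw']
    simp only [hs, hd, htab]
    have hfilB : lst.filter (fun t => suitOf t == some "wan")
        = lst.filter (fun t => PySem.Str.isIn "wan" t) :=
      List.filter_congr (fun t _ => suitOf_eq_wan t)
    have hfilD : lst.filter (fun t => dSuit t == some "wan")
        = lst.filter (fun t => PySem.Str.isIn "wan" t) := by
      rw [List.filter_congr (fun t _ => by rw [dSuit_eq_suitOf])]
      exact hfilB
    have hmapB : ∀ L : List String, L.map (fun t => (suitVals "wan").getD t 0)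
        = L.map (fun w => nameValuesWan.getD w 0) :=
      fun L => List.map_congr_left (fun t _ => by rw [suitVals_wan])
    rw [hfilB, hfilD, hmapB, suitVals_wan,
      cc_eq_innerB, cc_eq_innerB, hc_eq_nearB, hc_eq_nearB,
      guard_core _ _ _ _ (run2_to_run1 _) (run2_to_run1 _)]
    simp
  · rw [if_neg hw]
    by_cases ht : PySem.Str.isIn "tiao" givenTile = true
    · rw [if_pos ht]
      have hs : suitOf givenTile = some "tiao" := by
        simp only [suitOf, List.find?, hw, ht]
      have hd : dSuit givenTile = some "tiao" := by rw [dSuit_eq_suitOf]; exact hs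
      have htab : dTab givenTile = nameValuesTiao := by
        have hw' : PySem.Chars.isIn ['w','a','n'] givenTile.toList = false := by simpa using hw
        have ht' : PySem.Chars.isIn ['t','i','a','o'] givenTile.toList = true := by simpa using ht
        simp [dTab, hw', ht']
      simp only [hs, hd, htab]
      have hfilB : lst.filter (fun t => suitOf t == some "tiao")
          = lst.filter (fun t => !PySem.Str.isIn "wan" t && PySem.Str.isIn "tiao" t) :=
        List.filter_congr (fun t _ => suitOf_eq_tiao t)
      have hfilD : lst.filter (fun t => dSuit t == some "tiao")
          = lst.filter (fun t => !PySem.Str.isIn "wan" t && PySem.Str.isIn "tiao" t) := by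
        rw [List.filter_congr (fun t _ => by rw [dSuit_eq_suitOf])]
        exact hfilB
      have hmapB : ∀ L : List String, L.map (fun t => (suitVals "tiao").getD t 0)
          = L.map (fun w => nameValuesTiao.getD w 0) :=
        fun L => List.map_congr_left (fun t _ => by rw [suitVals_tiao])
      rw [hfilB, hfilD, hmapB, suitVals_tiao,
        cc_eq_innerB, cc_eq_innerB, hc_eq_nearB, hc_eq_nearB,
        guard_core _ _ _ _ (run2_to_run1 _) (run2_to_run1 _)]
      simp
    · rw [if_neg ht]
      by_cases hb : PySem.Str.isIn "bing" givenTile = true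
      · rw [if_pos hb]
        have hs : suitOf givenTile = some "bing" := by
          simp only [suitOf, List.find?, hw, ht, hb]
        have hd : dSuit givenTile = some "bing" := by rw [dSuit_eq_suitOf]; exact hs
        have htab : dTab givenTile = nameValuesBing := by
          have hw' : PySem.Chars.isIn ['w','a','n'] givenTile.toList = false := by simpa using hw
          have ht' : PySem.Chars.isIn ['t','i','a','o'] givenTile.toList = false := by simpa using ht
          simp [dTab, hw', ht']
        simp only [hs, hd, htab]
        have hfilB : lst.filter (fun t => suitOf t == some "bing")
            = lst.filter (fun t => !PySem.Str.isIn "wan" t && (!PySem.Str.isIn "tiao" t && PySem.Str.isIn "bing" t)) :=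
          List.filter_congr (fun t _ => suitOf_eq_bing t)
        have hfilD : lst.filter (fun t => dSuit t == some "bing")
            = lst.filter (fun t => !PySem.Str.isIn "wan" t && (!PySem.Str.isIn "tiao" t && PySem.Str.isIn "bing" t)) := by
          rw [List.filter_congr (fun t _ => by rw [dSuit_eq_suitOf])]
          exact hfilB
        have hmapB : ∀ L : List String, L.map (fun t => (suitVals "bing").getD t 0)
            = L.map (fun w => nameValuesBing.getD w 0) :=
          fun L => List.map_congr_left (fun t _ => by rw [suitVals_bing])
        rw [hfilB, hfilD, hmapB, suitVals_bing,
          cc_eq_innerB, cc_eq_innerB, hc_eq_nearB, hc_eq_nearB,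
          guard_core _ _ _ _ (run2_to_run1 _) (run2_to_run1 _)]
        simp
      · have hs : suitOf givenTile = none := by
          simp only [suitOf, List.find?, hw, ht, hb]
        have hd : dSuit givenTile = none := by rw [dSuit_eq_suitOf]; exact hs
        rw [if_neg hb]
        simp [hs, hd]

-- ===== VERDICT (by name: the statements are the Claim_ definitions above) =====
theorem isChi_spec : Claim_unchanged_isChi := by
  intro lst givenTile _ _ hnd
  by_contra hne
  exact hnd ((main_iff lst givenTile).mp hne)

theorem isChi_changed : Claim_changed_isChi := by
  unfold Claim_changed_isChi; decide

theorem isChi_tight : Claim_exact_isChi := by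
  intro lst givenTile _ _ hd
  exact (main_iff lst givenTile).mpr hd
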